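-- pv_equiv track=rewrite | github.com/davebug/rogueletters | cgi-bin/generate_daily_words.py | is_word_possible
-- ===== SOURCE A (Python) =====
-- from collections import Counter
--
-- TILE_DISTRIBUTION = {
--     'A': 9, 'B': 2, 'C': 2, 'D': 4, 'E': 12, 'F': 2, 'G': 3, 'H': 2,
--     'I': 9, 'J': 1, 'K': 1, 'L': 4, 'M': 2, 'N': 6, 'O': 8, 'P': 2,
--     'Q': 1, 'R': 6, 'S': 4, 'T': 6, 'U': 4, 'V': 2, 'W': 2, 'X': 1,
--     'Y': 2, 'Z': 1
-- }
--
-- def is_word_possible(word):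
--     """Check if a word is possible with available Scrabble tiles"""
--     letter_counts = Counter(word.upper())
--     for letter, count in letter_counts.items():
--         if letter not in TILE_DISTRIBUTION:
--             return False
--         if count > TILE_DISTRIBUTION[letter]:
--             return False
--     return True
-- ===== SOURCE B (Python) =====
-- TILE_COUNTS = [9, 2, 2, 4, 12, 2, 3, 2, 9, 1, 1, 4, 2, 6, 8, 2,
--                1, 6, 4, 6, 4, 2, 2, 1, 2, 1]  # tiles for 'A'..'Z'
--
-- def is_word_possible(word):
--     """Check if a word is possible with available Scrabble tiles"""
--     w = sorted(word.upper())
--     i, n = 0, len(w)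
--     while i < n:
--         k = ord(w[i]) - 65
--         if k < 0 or k > 25:
--             return False
--         j = i
--         while j < n and w[j] == w[i]:
--             j += 1
--         if j - i > TILE_COUNTS[k]:
--             return False
--         i = j
--     return True
-- ===== Notes on version B (the rewrite author's own statement) =====
-- stated objective: alternative
-- what changed: B replaces the Counter-then-compare dict approach entirely: it sorts the uppercased word, scans it once run by run (equal letters are contiguous after sorting), and checks each run's length against a plain 26-entry per-letter array indexed by ord(ch)-65 instead of any dict lookup.
import Mathlib
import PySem

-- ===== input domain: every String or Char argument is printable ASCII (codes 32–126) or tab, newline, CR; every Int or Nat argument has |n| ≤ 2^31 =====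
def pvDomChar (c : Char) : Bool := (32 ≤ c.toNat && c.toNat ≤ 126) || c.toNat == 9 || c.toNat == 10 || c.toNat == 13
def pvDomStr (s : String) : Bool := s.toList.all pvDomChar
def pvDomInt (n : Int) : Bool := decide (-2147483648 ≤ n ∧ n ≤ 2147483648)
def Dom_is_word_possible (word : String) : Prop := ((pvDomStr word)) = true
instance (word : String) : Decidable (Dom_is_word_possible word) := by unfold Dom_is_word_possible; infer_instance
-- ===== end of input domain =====

-- B drops A's Counter/dict approach for sort-then-run-scan: sort the uppercased word,
-- check each contiguous run of equal letters against a 26-entry array indexed by ord-65.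

-- ===== PORT A =====
-- A's module-level dict constant
def TILE_DISTRIBUTION : PySem.Dict Char Int := PySem.Dict.ofList
  [('A', 9), ('B', 2), ('C', 2), ('D', 4), ('E', 12), ('F', 2), ('G', 3), ('H', 2),
   ('I', 9), ('J', 1), ('K', 1), ('L', 4), ('M', 2), ('N', 6), ('O', 8), ('P', 2),
   ('Q', 1), ('R', 6), ('S', 4), ('T', 6), ('U', 4), ('V', 2), ('W', 2), ('X', 1),
   ('Y', 2), ('Z', 1)]

-- the 'for letter, count in letter_counts.items()' loop with its two early returns
-- (TILE_DISTRIBUTION[letter] is only read under the contains-guard, so getD is exact there)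
def pvLoopA : List (Char × Int) → Bool
  | [] => true
  | (letter, count) :: rest =>
    if TILE_DISTRIBUTION.contains letter = false then false
    else if TILE_DISTRIBUTION.getD letter 0 < count then false
    else pvLoopA rest

def is_word_possible (word : String) : Bool :=
  pvLoopA (PySem.Dict.counter (PySem.Chars.upper word.toList)).items

-- ===== PORT B =====
-- B's module-level per-letter array, tiles for 'A'..'Z'
def TILE_COUNTS : List Int := [9, 2, 2, 4, 12, 2, 3, 2, 9, 1, 1, 4, 2, 6, 8, 2,
                               1, 6, 4, 6, 4, 2, 2, 1, 2, 1]

-- B's outer while over the sorted list, as recursion on the remaining suffix: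
-- the inner 'while w[j] == w[i]: j += 1' advance is the takeWhile/dropWhile split of
-- that suffix, and j - i is the run length.  TILE_COUNTS[k] is pyGetD: the k-guard
-- just above ensures 0 ≤ k ≤ 25, so the index is in range and no IndexError occurs.
def pvRunScan : List Char → Bool
  | [] => true
  | c :: rest =>
    let k : Int := (c.toNat : Int) - 65
    if k < 0 ∨ 25 < k then false
    else
      let run : Int := (rest.takeWhile (fun x => x == c)).length + 1
      if PySem.List.pyGetD TILE_COUNTS k 0 < run then false
      else pvRunScan (rest.dropWhile (fun x => x == c))
termination_by l => l.length
decreasing_by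
  simp only [List.length_cons]
  exact Nat.lt_succ_of_le (List.length_dropWhile_le _ _)

def is_word_possible_alt (word : String) : Bool :=
  pvRunScan (PySem.List.sorted (PySem.Chars.upper word.toList) (fun x => x) false)

-- ===== PRECONDITION & SPEC =====
def Spec_is_word_possible (word : String) (out : Bool) : Prop := out = is_word_possible_alt word
instance (word : String) (out : Bool) : Decidable (Spec_is_word_possible word out) := by unfold Spec_is_word_possible; infer_instance

-- ===== CLAIM (what is proved, stated in full; the proofs are below) =====
def Claim_equal_is_word_possible : Prop := ∀ (word : String), Dom_is_word_possible word → Spec_is_word_possible word (is_word_possible word)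

-- ===== LEMMAS AND PROOFS =====

-- a char whose code is in [65, 90] is one of the 26 uppercase letters
theorem pvChar_cases (c : Char) (h1 : 65 ≤ c.toNat) (h2 : c.toNat ≤ 90) :
    c = 'A' ∨ c = 'B' ∨ c = 'C' ∨ c = 'D' ∨ c = 'E' ∨ c = 'F' ∨ c = 'G' ∨ c = 'H' ∨
    c = 'I' ∨ c = 'J' ∨ c = 'K' ∨ c = 'L' ∨ c = 'M' ∨ c = 'N' ∨ c = 'O' ∨ c = 'P' ∨
    c = 'Q' ∨ c = 'R' ∨ c = 'S' ∨ c = 'T' ∨ c = 'U' ∨ c = 'V' ∨ c = 'W' ∨ c = 'X' ∨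
    c = 'Y' ∨ c = 'Z' := by
  have hc : c = Char.ofNat c.toNat := (Char.ofNat_toNat c).symm
  set m := c.toNat with hm
  clear_value m
  subst hc
  interval_cases m <;> simp_all

-- the dict membership test of A is exactly B's code-range guard
theorem pvContains_iff (c : Char) :
    TILE_DISTRIBUTION.contains c = true ↔ 65 ≤ c.toNat ∧ c.toNat ≤ 90 := by
  constructor
  · intro h
    rw [PySem.Dict.contains_eq_decide_mem_keys,
      show TILE_DISTRIBUTION.keys =
        ['A','B','C','D','E','F','G','H','I','J','K','L','M',
         'N','O','P','Q','R','S','T','U','V','W','X','Y','Z'] from by decide] at h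
    have hm := of_decide_eq_true h
    fin_cases hm <;> decide
  · rintro ⟨h1, h2⟩
    rcases pvChar_cases c h1 h2 with h | h | h | h | h | h | h | h | h | h | h | h | h |
      h | h | h | h | h | h | h | h | h | h | h | h | h <;> subst h <;> decide

-- on uppercase letters, A's dict value is B's array entry
theorem pvGetD_eq (c : Char) (h1 : 65 ≤ c.toNat) (h2 : c.toNat ≤ 90) :
    TILE_DISTRIBUTION.getD c 0 = PySem.List.pyGetD TILE_COUNTS ((c.toNat : Int) - 65) 0 := by
  rcases pvChar_cases c h1 h2 with h | h | h | h | h | h | h | h | h | h | h | h | h |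
    h | h | h | h | h | h | h | h | h | h | h | h | h <;> subst h <;> decide

-- A's item loop is a universally-quantified check over the items list
theorem pvLoopA_eq_true_iff (items : List (Char × Int)) :
    pvLoopA items = true ↔
      ∀ p ∈ items, TILE_DISTRIBUTION.contains p.1 = true ∧ p.2 ≤ TILE_DISTRIBUTION.getD p.1 0 := by
  induction items with
  | nil => simp [pvLoopA]
  | cons p rest ih =>
    obtain ⟨letter, count⟩ := p
    simp only [pvLoopA, List.mem_cons]
    by_cases hc : TILE_DISTRIBUTION.contains letter = false
    · rw [if_pos hc]
      constructor
      · intro hf; exact absurd hf (by simp)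
      · intro hall
        have := (hall (letter, count) (Or.inl rfl)).1
        rw [hc] at this; exact absurd this (by simp)
    · rw [if_neg hc]
      have hc' : TILE_DISTRIBUTION.contains letter = true := by
        cases hcb : TILE_DISTRIBUTION.contains letter
        · exact absurd hcb hc
        · rfl
      by_cases hlt : TILE_DISTRIBUTION.getD letter 0 < count
      · rw [if_pos hlt]
        constructor
        · intro hf; exact absurd hf (by simp)
        · intro hall
          have h2 := (hall (letter, count) (Or.inl rfl)).2
          dsimp only at h2
          omega
      · rw [if_neg hlt, ih]
        constructor
        · intro H q hq
          rcases hq with hq | hq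
          · subst hq
            refine ⟨hc', ?_⟩
            dsimp only
            omega
          · exact H q hq
        · intro H q hq; exact H q (Or.inr hq)

-- in a non-decreasing list headed by c, everything after the c-run differs from c
theorem pvHead_not_mem_dropWhile (c : Char) (rest : List Char)
    (hp : (c :: rest).Pairwise (fun a b => a ≤ b)) :
    c ∉ rest.dropWhile (fun x => x == c) := by
  intro hmem
  have hne : rest.dropWhile (fun x => x == c) ≠ [] := by
    intro h; rw [h] at hmem; exact absurd hmem (List.not_mem_nil)
  cases hdw : rest.dropWhile (fun x => x == c) with
  | nil => exact hne hdw
  | cons d t =>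
    have hdfalse : (d == c) = false := by
      have := List.head_dropWhile_not (fun x => x == c) hne
      rwa [show (rest.dropWhile (fun x => x == c)).head hne = d from by simp [hdw]] at this
    have hdne : d ≠ c := by simpa using hdfalse
    have hsub : (d :: t).Sublist rest := hdw ▸ List.dropWhile_sublist _
    have hd_mem : d ∈ rest := hsub.mem (List.mem_cons_self ..)
    have hcd : c ≤ d := (List.pairwise_cons.mp hp).1 d hd_mem
    have hdt : (d :: t).Pairwise (fun a b => a ≤ b) :=
      ((List.pairwise_cons.mp hp).2).sublist hsub
    rw [hdw] at hmem
    rcases List.mem_cons.mp hmem with h | h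
    · exact hdne h.symm
    · have hdc : d ≤ c := (List.pairwise_cons.mp hdt).1 c h
      exact hdne (le_antisymm hdc hcd)

-- B's run scan on a sorted list checks exactly 'every letter known and its count fits'
theorem pvRunScan_eq_true_iff (l : List Char) (hp : l.Pairwise (fun a b => a ≤ b)) :
    pvRunScan l = true ↔
      ∀ c ∈ l, (65 ≤ c.toNat ∧ c.toNat ≤ 90) ∧
        (l.count c : Int) ≤ PySem.List.pyGetD TILE_COUNTS ((c.toNat : Int) - 65) 0 := by
  induction l using pvRunScan.induct with
  | case1 => simp [pvRunScan]
  | case2 c rest k hk =>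
    have hk2 : ((c.toNat : Int) - 65 < 0 ∨ 25 < (c.toNat : Int) - 65) := hk
    rw [pvRunScan, if_pos hk2]
    constructor
    · intro hf; simp at hf
    · intro hall
      have := (hall c (List.mem_cons_self ..)).1
      omega
  | case3 c rest k hk run hbig =>
    have hk2 : ¬((c.toNat : Int) - 65 < 0 ∨ 25 < (c.toNat : Int) - 65) := hk
    have hb2 : PySem.List.pyGetD TILE_COUNTS ((c.toNat : Int) - 65) 0
        < ((rest.takeWhile (fun x => x == c)).length : Int) + 1 := hbig
    rw [pvRunScan, if_neg hk2, if_pos hb2]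
    constructor
    · intro hf; simp at hf
    · intro hall
      have hcnt := (hall c (List.mem_cons_self ..)).2
      -- count c (c :: rest) = run
      have htw : (rest.takeWhile (fun x => x == c)).count c
          = (rest.takeWhile (fun x => x == c)).length := by
        rw [List.count_eq_length]
        intro b hb
        have hb2 : b = c := by simpa using List.mem_takeWhile_imp hb
        exact hb2.symm
      have hdw : (rest.dropWhile (fun x => x == c)).count c = 0 :=
        List.count_eq_zero.mpr (pvHead_not_mem_dropWhile c rest hp)
      have hsplit : rest.count c
          = (rest.takeWhile (fun x => x == c)).count c
            + (rest.dropWhile (fun x => x == c)).count c := by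
        conv_lhs => rw [← List.takeWhile_append_dropWhile (p := fun x => x == c) (l := rest)]
        exact List.count_append ..
      have : (c :: rest).count c = (rest.takeWhile (fun x => x == c)).length + 1 := by
        rw [List.count_cons_self, hsplit, htw, hdw]
      rw [this] at hcnt
      push_cast at hcnt
      omega
  | case4 c rest k hk run hbig ih =>
    have hk2 : ¬((c.toNat : Int) - 65 < 0 ∨ 25 < (c.toNat : Int) - 65) := hk
    have hb2 : ¬(PySem.List.pyGetD TILE_COUNTS ((c.toNat : Int) - 65) 0
        < ((rest.takeWhile (fun x => x == c)).length : Int) + 1) := hbig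
    rw [pvRunScan, if_neg hk2, if_neg hb2]
    have hk' : 65 ≤ c.toNat ∧ c.toNat ≤ 90 := by omega
    have hrest : rest.Pairwise (fun a b => a ≤ b) := (List.pairwise_cons.mp hp).2
    have hdwp : (rest.dropWhile (fun x => x == c)).Pairwise (fun a b => a ≤ b) :=
      hrest.sublist (List.dropWhile_sublist _)
    rw [ih hdwp]
    -- count facts shared by both directions
    have htw : (rest.takeWhile (fun x => x == c)).count c
        = (rest.takeWhile (fun x => x == c)).length := by
      rw [List.count_eq_length]
      intro b hb
      have hb2 : b = c := by simpa using List.mem_takeWhile_imp hb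
      exact hb2.symm
    have hnotc : c ∉ rest.dropWhile (fun x => x == c) := pvHead_not_mem_dropWhile c rest hp
    have hdw0 : (rest.dropWhile (fun x => x == c)).count c = 0 := List.count_eq_zero.mpr hnotc
    have hsplit : ∀ x : Char, rest.count x
        = (rest.takeWhile (fun x => x == c)).count x
          + (rest.dropWhile (fun x => x == c)).count x := by
      intro x
      conv_lhs => rw [← List.takeWhile_append_dropWhile (p := fun x => x == c) (l := rest)]
      exact List.count_append ..
    have hccount : (c :: rest).count c = (rest.takeWhile (fun x => x == c)).length + 1 := by
      rw [List.count_cons_self, hsplit, htw, hdw0]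
    -- a letter of the dropWhile suffix has the same count there as in the whole list
    have hother : ∀ x ∈ rest.dropWhile (fun x => x == c),
        (c :: rest).count x = (rest.dropWhile (fun x => x == c)).count x := by
      intro x hx
      have hxc : x ≠ c := by rintro rfl; exact hnotc hx
      have htw0 : (rest.takeWhile (fun x => x == c)).count x = 0 := by
        rw [List.count_eq_zero]
        intro hmem
        have := List.mem_takeWhile_imp hmem
        exact hxc (by simpa using this)
      rw [List.count_cons_of_ne hxc.symm, hsplit, htw0]
      omega
    constructor
    · intro H x hx
      rcases List.mem_cons.mp hx with rfl | hx'
      · refine ⟨hk', ?_⟩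
        rw [hccount]
        push_cast
        omega
      · rw [← List.takeWhile_append_dropWhile (p := fun x => x == c) (l := rest)] at hx'
        rcases List.mem_append.mp hx' with hx'' | hx''
        · have : x = c := by simpa using List.mem_takeWhile_imp hx''
          subst this
          refine ⟨hk', ?_⟩
          rw [hccount]
          push_cast
          omega
        · obtain ⟨hr, hcnt⟩ := H x hx''
          exact ⟨hr, by rw [hother x hx'']; exact hcnt⟩
    · intro H x hx
      obtain ⟨hr, hcnt⟩ := H x
        ((List.dropWhile_sublist (l := rest) (p := fun x => x == c)).mem hx
          |> fun h => List.mem_cons_of_mem c h)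
      exact ⟨hr, by rw [← hother x hx]; exact hcnt⟩

-- the two programs agree on any character list
theorem pvAgree (u : List Char) :
    pvLoopA (PySem.Dict.counter u).items
      = pvRunScan (PySem.List.sorted u (fun x => x) false) := by
  have hp : (PySem.List.sorted u (fun x => x) false).Pairwise (fun a b => a ≤ b) :=
    PySem.List.sorted_pairwise u (fun x => x)
  have hperm : (PySem.List.sorted u (fun x => x) false).Perm u :=
    PySem.List.sorted_perm u (fun x => x) false
  rw [Bool.eq_iff_iff, pvLoopA_eq_true_iff, pvRunScan_eq_true_iff _ hp]
  rw [PySem.Dict.items_counter]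
  constructor
  · intro H c hc
    have hcu : c ∈ u := hperm.mem_iff.mp hc
    have hm : c ∈ PySem.Set.ofList u := (PySem.Set.mem_ofList u c).mpr hcu
    obtain ⟨hcon, hle⟩ := H (c, (u.count c : Int)) (List.mem_map.mpr ⟨c, hm, rfl⟩)
    have hr := (pvContains_iff c).mp hcon
    refine ⟨hr, ?_⟩
    rw [hperm.count_eq, ← pvGetD_eq c hr.1 hr.2]
    exact hle
  · intro H p hp'
    obtain ⟨c, hc, rfl⟩ := List.mem_map.mp hp'
    have hcu : c ∈ u := (PySem.Set.mem_ofList u c).mp hc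
    obtain ⟨hr, hcnt⟩ := H c (hperm.mem_iff.mpr hcu)
    refine ⟨(pvContains_iff c).mpr hr, ?_⟩
    rw [hperm.count_eq] at hcnt
    rw [pvGetD_eq c hr.1 hr.2]
    exact hcnt

-- ===== VERDICT (by name: the statement is the Claim_ definition above) =====
theorem is_word_possible_spec : Claim_equal_is_word_possible := by
  intro word _
  unfold Spec_is_word_possible is_word_possible is_word_possible_alt
  exact pvAgree _
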